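-- pv_equiv track=rewrite | github.com/jgoliszewski/SortingVisualiser | quickSort.py | colorArray
-- ===== SOURCE A (Python) =====
-- green = '#00e30b'
--
-- orange = '#ffa500'
--
-- blue = '#15b4ea'
--
-- def colorArray(data, i, sort, head, tail, j=None, pivotSwaping=False, bucket=True, bucketColors=None):
-- 	colors = []
-- 	color = blue if pivotSwaping else 'red'
--
-- 	for x in range(len(data)):
--
-- 		if x in sort:
-- 			if bucket:
-- 				colors.append(bucketColors[x])
--
-- 			else:
-- 				colors.append(green)
--
-- 		elif x < head or x > tail:
-- 			if bucket:
-- 				colors.append(bucketColors[x])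
--
-- 			else:
-- 				colors.append('gray')
--
-- 		elif x == i or x == j:
-- 			colors.append(color)
--
-- 		else:
-- 			colors.append(orange)
--
-- 	return colors
-- ===== SOURCE B (Python) =====
-- def colorArray(data, i, sort, head, tail, j=None, pivotSwaping=False, bucket=True, bucketColors=None):
--     n = len(data)
--     colors = ['#ffa500'] * n
--     pivot = '#15b4ea' if pivotSwaping else 'red'
--     # overwrite in reverse-priority order: pivot pair, then out-of-range, then sorted
--     for x in range(n):
--         if x == i or x == j:
--             colors[x] = pivot
--     for x in range(n):
--         if x < head or x > tail:
--             colors[x] = bucketColors[x] if bucket else 'gray'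
--     for x in range(n):
--         if x in sort:
--             colors[x] = bucketColors[x] if bucket else '#00e30b'
--     return colors
-- ===== Notes on version B (the rewrite author's own statement) =====
-- stated objective: alternative
-- what changed: Replaced the single cascading if/elif classification-and-append loop by initialize-all-orange plus three selective overwrite passes in reverse priority order (pivot indices, then out-of-range, then sorted).
import Mathlib
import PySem

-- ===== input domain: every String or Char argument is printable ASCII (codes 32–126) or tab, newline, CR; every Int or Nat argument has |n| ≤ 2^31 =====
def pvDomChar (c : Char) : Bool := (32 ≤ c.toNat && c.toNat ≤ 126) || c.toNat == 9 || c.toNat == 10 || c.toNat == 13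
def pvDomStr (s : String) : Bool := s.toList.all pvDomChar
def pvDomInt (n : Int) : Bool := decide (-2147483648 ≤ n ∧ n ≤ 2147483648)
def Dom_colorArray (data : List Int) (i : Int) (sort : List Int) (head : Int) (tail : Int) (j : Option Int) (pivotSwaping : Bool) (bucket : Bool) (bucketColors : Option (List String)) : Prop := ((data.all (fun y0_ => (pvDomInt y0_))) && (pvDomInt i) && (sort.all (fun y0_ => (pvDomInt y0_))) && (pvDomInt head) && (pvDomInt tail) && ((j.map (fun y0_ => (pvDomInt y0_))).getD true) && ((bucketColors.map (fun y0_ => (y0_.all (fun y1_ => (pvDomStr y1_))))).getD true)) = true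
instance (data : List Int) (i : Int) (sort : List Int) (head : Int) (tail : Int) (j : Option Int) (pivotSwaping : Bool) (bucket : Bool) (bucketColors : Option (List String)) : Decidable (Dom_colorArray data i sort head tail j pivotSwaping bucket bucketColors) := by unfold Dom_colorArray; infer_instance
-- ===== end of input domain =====

-- B replaces A's single cascading if/elif loop by initialize-orange + three overwrite passes
-- in reverse priority order; equal return values; neither is faster (objective: alternative).

-- bucketColors[x]: exact on Pre_ (bucketColors = some bc and x < bc.length there);
-- Python raises outside Pre_, which Pre_ excludes.
def pvBCGet (bucketColors : Option (List String)) (x : Nat) : String :=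
  (bucketColors.getD []).getD x ""

-- ===== PORT A =====
def colorArray (data : List Int) (i : Int) (sort : List Int) (head : Int) (tail : Int) (j : Option Int) (pivotSwaping : Bool) (bucket : Bool) (bucketColors : Option (List String)) : List String :=
  let color := if pivotSwaping then "#15b4ea" else "red"
  (List.range data.length).foldl (fun (colors : List String) (x : Nat) =>
    if (x : Int) ∈ sort then
      colors ++ [if bucket then pvBCGet bucketColors x else "#00e30b"]
    else if (x : Int) < head ∨ tail < (x : Int) then
      colors ++ [if bucket then pvBCGet bucketColors x else "gray"]
    else if (x : Int) = i ∨ j = some (x : Int) then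
      colors ++ [color]
    else
      colors ++ ["#ffa500"]) []

-- ===== PORT B =====
def colorArray_alt (data : List Int) (i : Int) (sort : List Int) (head : Int) (tail : Int) (j : Option Int) (pivotSwaping : Bool) (bucket : Bool) (bucketColors : Option (List String)) : List String :=
  let n := data.length
  let pivot := if pivotSwaping then "#15b4ea" else "red"
  let colors0 := List.replicate n "#ffa500"
  let colors1 := (List.range n).foldl (fun (cs : List String) (x : Nat) =>
    if (x : Int) = i ∨ j = some (x : Int) then cs.set x pivot else cs) colors0
  let colors2 := (List.range n).foldl (fun (cs : List String) (x : Nat) =>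
    if (x : Int) < head ∨ tail < (x : Int) then
      cs.set x (if bucket then pvBCGet bucketColors x else "gray") else cs) colors1
  let colors3 := (List.range n).foldl (fun (cs : List String) (x : Nat) =>
    if (x : Int) ∈ sort then
      cs.set x (if bucket then pvBCGet bucketColors x else "#00e30b") else cs) colors2
  colors3

-- ===== PRECONDITION & SPEC =====
-- Pre_ excludes exactly the inputs where Python A raises (TypeError/IndexError subscripting
-- bucketColors while bucket is true at some index the loop classifies as sorted/out-of-range).
def Pre_colorArray (data : List Int) (i : Int) (sort : List Int) (head : Int) (tail : Int) (j : Option Int) (pivotSwaping : Bool) (bucket : Bool) (bucketColors : Option (List String)) : Prop :=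
  bucket = true → ∀ x ∈ List.range data.length,
    ((x : Int) ∈ sort ∨ (x : Int) < head ∨ tail < (x : Int)) →
      x < (bucketColors.getD []).length
instance (data : List Int) (i : Int) (sort : List Int) (head : Int) (tail : Int) (j : Option Int) (pivotSwaping : Bool) (bucket : Bool) (bucketColors : Option (List String)) : Decidable (Pre_colorArray data i sort head tail j pivotSwaping bucket bucketColors) := by unfold Pre_colorArray; infer_instance

def pvWitness_colorArray : List Int × Int × List Int × Int × Int × Option Int × Bool × Bool × Option (List String) :=
  ([4, 7, 2], 0, [2], 1, 2, some 1, false, true, some ["#aaa", "#bbb", "#ccc"])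

def Spec_colorArray (data : List Int) (i : Int) (sort : List Int) (head : Int) (tail : Int) (j : Option Int) (pivotSwaping : Bool) (bucket : Bool) (bucketColors : Option (List String)) (out : List String) : Prop := out = colorArray_alt data i sort head tail j pivotSwaping bucket bucketColors
instance (data : List Int) (i : Int) (sort : List Int) (head : Int) (tail : Int) (j : Option Int) (pivotSwaping : Bool) (bucket : Bool) (bucketColors : Option (List String)) (out : List String) : Decidable (Spec_colorArray data i sort head tail j pivotSwaping bucket bucketColors out) := by unfold Spec_colorArray; infer_instance

-- ===== CLAIM (what is proved, stated in full; the proofs are below) =====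
def Claim_equal_colorArray : Prop := ∀ (data : List Int) (i : Int) (sort : List Int) (head : Int) (tail : Int) (j : Option Int) (pivotSwaping : Bool) (bucket : Bool) (bucketColors : Option (List String)), Dom_colorArray data i sort head tail j pivotSwaping bucket bucketColors → Pre_colorArray data i sort head tail j pivotSwaping bucket bucketColors → Spec_colorArray data i sort head tail j pivotSwaping bucket bucketColors (colorArray data i sort head tail j pivotSwaping bucket bucketColors)

-- ===== LEMMAS AND PROOFS =====

-- the classifying function both sides compute pointwise
def pvClassify (i : Int) (sort : List Int) (head : Int) (tail : Int) (j : Option Int) (pivotSwaping : Bool) (bucket : Bool) (bucketColors : Option (List String)) (x : Nat) : String :=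
  if (x : Int) ∈ sort then
    (if bucket then pvBCGet bucketColors x else "#00e30b")
  else if (x : Int) < head ∨ tail < (x : Int) then
    (if bucket then pvBCGet bucketColors x else "gray")
  else if (x : Int) = i ∨ j = some (x : Int) then
    (if pivotSwaping then "#15b4ea" else "red")
  else "#ffa500"

-- A's append-fold over range is the map of the classifying function.
theorem pv_foldl_append_map {alpha beta : Type} (f : alpha → beta) :
    ∀ (l : List alpha) (acc : List beta),
      l.foldl (fun cs x => cs ++ [f x]) acc = acc ++ l.map f := by
  intro l
  induction l with
  | nil => intro acc; simp
  | cons x xs ih => intro acc; simp [List.foldl, ih]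

theorem pv_A_eq_map (data : List Int) (i : Int) (sort : List Int) (head : Int) (tail : Int) (j : Option Int) (pivotSwaping : Bool) (bucket : Bool) (bucketColors : Option (List String)) :
    colorArray data i sort head tail j pivotSwaping bucket bucketColors =
      (List.range data.length).map (pvClassify i sort head tail j pivotSwaping bucket bucketColors) := by
  unfold colorArray
  show (List.range data.length).foldl (fun (colors : List String) (x : Nat) =>
      if (x : Int) ∈ sort then
        colors ++ [if bucket then pvBCGet bucketColors x else "#00e30b"]
      else if (x : Int) < head ∨ tail < (x : Int) then
        colors ++ [if bucket then pvBCGet bucketColors x else "gray"]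
      else if (x : Int) = i ∨ j = some (x : Int) then
        colors ++ [if pivotSwaping then "#15b4ea" else "red"]
      else
        colors ++ ["#ffa500"]) [] = _
  have hfun : (fun (colors : List String) (x : Nat) =>
      if (x : Int) ∈ sort then
        colors ++ [if bucket then pvBCGet bucketColors x else "#00e30b"]
      else if (x : Int) < head ∨ tail < (x : Int) then
        colors ++ [if bucket then pvBCGet bucketColors x else "gray"]
      else if (x : Int) = i ∨ j = some (x : Int) then
        colors ++ [if pivotSwaping then "#15b4ea" else "red"]
      else
        colors ++ ["#ffa500"]) =
      (fun cs x => cs ++ [pvClassify i sort head tail j pivotSwaping bucket bucketColors x]) := by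
    funext cs x
    unfold pvClassify
    split_ifs <;> rfl
  rw [hfun, pv_foldl_append_map]
  simp

-- An overwrite pass over a list of indices, read back pointwise.
theorem pv_setfold_getElem? (p : Nat → Prop) [DecidablePred p] (v : Nat → String) (k : Nat) :
    ∀ (l : List Nat) (cs : List String), (∀ x ∈ l, x < cs.length) →
      (l.foldl (fun cs x => if p x then cs.set x (v x) else cs) cs)[k]? =
        if k ∈ l ∧ p k then some (v k) else cs[k]? := by
  intro l
  induction l with
  | nil => intro cs _; simp
  | cons x xs ih =>
    intro cs hlt
    have hx : x < cs.length := hlt x (by simp)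
    have hlen : (if p x then cs.set x (v x) else cs).length = cs.length := by
      split <;> simp
    rw [List.foldl_cons, ih _ (by intro y hy; rw [hlen]; exact hlt y (by simp [hy]))]
    by_cases hmem : k ∈ xs ∧ p k
    · simp [hmem]
    · simp only [if_neg hmem]
      by_cases hk : k = x
      · subst hk
        by_cases hp : p k
        · simp [hp, List.getElem?_set_self hx]
        · simp [hp]
      · have hnot : ¬ (k ∈ x :: xs ∧ p k) := by
          intro hcon
          rcases List.mem_cons.mp hcon.1 with h | h
          · exact hk h
          · exact hmem ⟨h, hcon.2⟩
        simp only [if_neg hnot]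
        split
        · rw [List.getElem?_set_ne (by omega)]
        · rfl

theorem pv_setfold_length (p : Nat → Prop) [DecidablePred p] (v : Nat → String) :
    ∀ (l : List Nat) (cs : List String),
      (l.foldl (fun cs x => if p x then cs.set x (v x) else cs) cs).length = cs.length := by
  intro l
  induction l with
  | nil => intro cs; rfl
  | cons x xs ih => intro cs; rw [List.foldl_cons, ih]; split <;> simp

theorem pv_B_eq_map (data : List Int) (i : Int) (sort : List Int) (head : Int) (tail : Int) (j : Option Int) (pivotSwaping : Bool) (bucket : Bool) (bucketColors : Option (List String)) :
    colorArray_alt data i sort head tail j pivotSwaping bucket bucketColors =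
      (List.range data.length).map (pvClassify i sort head tail j pivotSwaping bucket bucketColors) := by
  unfold colorArray_alt
  show ((List.range data.length).foldl (fun (cs : List String) (x : Nat) =>
      if (x : Int) ∈ sort then
        cs.set x (if bucket then pvBCGet bucketColors x else "#00e30b") else cs)
    ((List.range data.length).foldl (fun (cs : List String) (x : Nat) =>
      if (x : Int) < head ∨ tail < (x : Int) then
        cs.set x (if bucket then pvBCGet bucketColors x else "gray") else cs)
      ((List.range data.length).foldl (fun (cs : List String) (x : Nat) =>
        if (x : Int) = i ∨ j = some (x : Int) then
          cs.set x (if pivotSwaping then "#15b4ea" else "red") else cs)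
        (List.replicate data.length "#ffa500")))) = _
  set n := data.length with hn
  set cs0 := List.replicate n "#ffa500" with hcs0
  set cs1 := (List.range n).foldl (fun (cs : List String) (x : Nat) =>
      if (x : Int) = i ∨ j = some (x : Int) then
        cs.set x (if pivotSwaping then "#15b4ea" else "red") else cs) cs0 with hcs1
  set cs2 := (List.range n).foldl (fun (cs : List String) (x : Nat) =>
      if (x : Int) < head ∨ tail < (x : Int) then
        cs.set x (if bucket then pvBCGet bucketColors x else "gray") else cs) cs1 with hcs2
  have hl0 : cs0.length = n := by simp [hcs0]
  have hl1 : cs1.length = n := by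
    rw [hcs1, pv_setfold_length (fun x => (x : Int) = i ∨ j = some (x : Int)) _ (List.range n) cs0, hl0]
  have hl2 : cs2.length = n := by
    rw [hcs2, pv_setfold_length (fun x => (x : Int) < head ∨ tail < (x : Int)) _ (List.range n) cs1, hl1]
  apply List.ext_getElem?
  intro k
  have h3 : ((List.range n).foldl (fun (cs : List String) (x : Nat) =>
      if (x : Int) ∈ sort then
        cs.set x (if bucket then pvBCGet bucketColors x else "#00e30b") else cs) cs2)[k]? =
      if k ∈ List.range n ∧ (k : Int) ∈ sort then
        some (if bucket then pvBCGet bucketColors k else "#00e30b") else cs2[k]? :=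
    pv_setfold_getElem? (fun x => (x : Int) ∈ sort) _ k (List.range n) cs2
      (by intro x hx; rw [hl2]; exact List.mem_range.mp hx)
  have h2 : cs2[k]? =
      if k ∈ List.range n ∧ ((k : Int) < head ∨ tail < (k : Int)) then
        some (if bucket then pvBCGet bucketColors k else "gray") else cs1[k]? := by
    rw [hcs2]
    exact pv_setfold_getElem? (fun x => (x : Int) < head ∨ tail < (x : Int)) _ k (List.range n) cs1
      (by intro x hx; rw [hl1]; exact List.mem_range.mp hx)
  have h1 : cs1[k]? =
      if k ∈ List.range n ∧ ((k : Int) = i ∨ j = some (k : Int)) then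
        some (if pivotSwaping then "#15b4ea" else "red") else cs0[k]? := by
    rw [hcs1]
    exact pv_setfold_getElem? (fun x => (x : Int) = i ∨ j = some (x : Int)) _ k (List.range n) cs0
      (by intro x hx; rw [hl0]; exact List.mem_range.mp hx)
  rw [h3, h2, h1]
  by_cases hkn : k < n
  · have hkr : k ∈ List.range n := List.mem_range.mpr hkn
    have hmap : ((List.range n).map (pvClassify i sort head tail j pivotSwaping bucket bucketColors))[k]? =
        some (pvClassify i sort head tail j pivotSwaping bucket bucketColors k) := by
      rw [List.getElem?_map, List.getElem?_range hkn]
      rfl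
    rw [hmap]
    unfold pvClassify
    simp only [hkr, true_and]
    by_cases c3 : (k : Int) ∈ sort
    · simp [c3]
    · simp only [if_neg c3]
      by_cases c2 : (k : Int) < head ∨ tail < (k : Int)
      · simp [c2]
      · simp only [if_neg c2]
        by_cases c1 : (k : Int) = i ∨ j = some (k : Int)
        · simp [c1]
        · simp only [if_neg c1, hcs0, List.getElem?_replicate]
          simp [hkn]
  · have hge : n ≤ k := Nat.le_of_not_lt hkn
    have hnr : k ∉ List.range n := by simp [List.mem_range]; omega
    simp only [hnr, false_and, if_false]
    rw [List.getElem?_eq_none (by rw [hl0]; omega),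
      List.getElem?_eq_none (by simp; omega)]

-- ===== VERDICT (by name: the statement is the Claim_ definition above) =====
theorem colorArray_spec : Claim_equal_colorArray := by
  intro data i sort head tail j pivotSwaping bucket bucketColors _ _
  unfold Spec_colorArray
  rw [pv_A_eq_map, pv_B_eq_map]
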